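-- pv_equiv track=rewrite | github.com/osekilab/TSE-Chomsky | chomsky_neural/data/tasks.py | check_Dyck
-- ===== SOURCE A (Python) =====
-- from typing import List
--
-- def check_Dyck(string: List[int]) -> bool:
--     val = 0
--     for x in string:
--         val = val + (1 - 2 * x)
--         if val < 0:
--             return False
--     if val == 0:
--         return True
--     else:
--         return False
-- ===== SOURCE B (Python) =====
-- from typing import List
--
-- def check_Dyck(string: List[int]) -> bool:
--     # Right-to-left suffix-summary computation: for the suffix processed so far,
--     # keep (total, lowest) where total is the sum of its values 1-2*x and lowest
--     # is the minimum of 0 and all its prefix sums.  Prepending a value v updates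
--     # the summary by (v + total, min(0, v + lowest)).  The word is balanced iff
--     # the whole list's summary has lowest == 0 (no prefix dips below 0) and total == 0.
--     total = 0
--     lowest = 0
--     for x in reversed(string):
--         v = 1 - 2 * x
--         total = v + total
--         lowest = min(0, v + lowest)
--     return lowest == 0 and total == 0
-- ===== Notes on version B (the rewrite author's own statement) =====
-- stated objective: alternative
-- what changed: Replaced the forward early-exit balance scan with a right-to-left suffix-summary computation: a (total, min-prefix) pair maintained under the prepend rule (v+total, min(0, v+lowest)), with one arithmetic check at the end.
import Mathlib
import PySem

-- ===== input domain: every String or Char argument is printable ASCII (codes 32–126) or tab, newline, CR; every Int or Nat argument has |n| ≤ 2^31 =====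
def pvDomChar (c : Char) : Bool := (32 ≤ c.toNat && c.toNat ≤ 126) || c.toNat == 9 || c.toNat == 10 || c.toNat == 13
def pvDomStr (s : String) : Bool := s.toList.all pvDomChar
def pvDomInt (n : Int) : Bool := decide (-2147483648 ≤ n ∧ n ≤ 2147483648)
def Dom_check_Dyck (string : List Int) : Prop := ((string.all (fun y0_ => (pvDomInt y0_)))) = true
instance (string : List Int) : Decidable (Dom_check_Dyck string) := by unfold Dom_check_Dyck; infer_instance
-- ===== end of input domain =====

-- B replaces A's forward early-exit balance scan by a right-to-left suffix-summary
-- computation: a (total, lowest) pair built back-to-front, then one final arithmetic check.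
-- Objective: alternative (same O(n) cost, different traversal and state).


-- ===== PORT A =====
-- A's loop with early return: recursion on the list carrying val.
def checkDyckLoopA (val : Int) : List Int → Bool
  | [] => val == 0
  | x :: xs =>
    let v := val + (1 - 2 * x)
    if v < 0 then false else checkDyckLoopA v xs

def check_Dyck (string : List Int) : Bool := checkDyckLoopA 0 string

-- ===== PORT B =====
-- B's reversed loop: processing the list back-to-front with accumulators (total, lowest)
-- is structural recursion on the list (the last-seen element is the head).
def checkDyckSummary : List Int → Int × Int
  | [] => (0, 0)
  | x :: xs =>
    let r := checkDyckSummary xs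
    let v := 1 - 2 * x
    (v + r.1, min 0 (v + r.2))

def check_Dyck_alt (string : List Int) : Bool :=
  let r := checkDyckSummary string
  r.2 == 0 && r.1 == 0

-- ===== PRECONDITION & SPEC =====
def Spec_check_Dyck (string : List Int) (out : Bool) : Prop := out = check_Dyck_alt string
instance (string : List Int) (out : Bool) : Decidable (Spec_check_Dyck string out) := by unfold Spec_check_Dyck; infer_instance

-- ===== CLAIM (what is proved, stated in full; the proofs are below) =====
def Claim_equal_check_Dyck : Prop := ∀ (string : List Int), Dom_check_Dyck string → Spec_check_Dyck string (check_Dyck string)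

-- ===== LEMMAS AND PROOFS =====
-- A's loop from state val succeeds iff val plus the suffix total is 0 and
-- val plus the clamped minimum prefix sum stays ≥ 0 — provided 0 ≤ val,
-- which A's top-level call (val = 0) supplies.
theorem checkDyckLoopA_eq (xs : List Int) : ∀ (val : Int), 0 ≤ val →
    checkDyckLoopA val xs =
      (decide (0 ≤ val + (checkDyckSummary xs).2) && (val + (checkDyckSummary xs).1 == 0)) := by
  induction xs with
  | nil => intro val h; simp [checkDyckLoopA, checkDyckSummary, h]
  | cons x xs ih =>
    intro val h
    simp only [checkDyckLoopA, checkDyckSummary]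
    set v := val + (1 - 2 * x) with hv
    by_cases hneg : v < 0
    · have : ¬ (0 ≤ val + min 0 ((1 - 2*x) + (checkDyckSummary xs).2)) := by
        have : min 0 ((1 - 2*x) + (checkDyckSummary xs).2) ≤ (1 - 2*x) + (checkDyckSummary xs).2 := min_le_right _ _
        have h2 : (checkDyckSummary xs).2 ≤ 0 := by
          cases xs with
          | nil => simp [checkDyckSummary]
          | cons y ys => simp only [checkDyckSummary]; exact min_le_left _ _
        omega
      simp [hneg, this]
    · rw [if_neg hneg, ih v (by omega)]
      have e1 : (decide (0 ≤ v + (checkDyckSummary xs).2) : Bool)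
          = decide (0 ≤ val + min 0 ((1 - 2*x) + (checkDyckSummary xs).2)) := by
        simp only [decide_eq_decide]; omega
      have e2 : v + (checkDyckSummary xs).1 = val + ((1 - 2*x) + (checkDyckSummary xs).1) := by
        omega
      rw [e1, e2]
      rfl

theorem summary_snd_nonpos (xs : List Int) : (checkDyckSummary xs).2 ≤ 0 := by
  cases xs with
  | nil => simp [checkDyckSummary]
  | cons y ys => simp only [checkDyckSummary]; exact min_le_left _ _

-- ===== VERDICT (by name: the statement is the Claim_ definition above) =====
theorem check_Dyck_spec : Claim_equal_check_Dyck := by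
  intro string _
  unfold Spec_check_Dyck check_Dyck check_Dyck_alt
  rw [checkDyckLoopA_eq string 0 le_rfl]
  have := summary_snd_nonpos string
  simp only [zero_add]
  have e : (decide (0 ≤ (checkDyckSummary string).2) : Bool) = ((checkDyckSummary string).2 == 0) := by
    by_cases h : (checkDyckSummary string).2 = 0
    · simp [h]
    · simp [h, show ¬ (0 ≤ (checkDyckSummary string).2) by omega]
  rw [e]
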